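-- pv_equiv track=rewrite | github.com/devmanorg/moscow-bus-routes | routes_fetcher.py | get_ordered_route_segments
-- ===== SOURCE A (Python) =====
-- from collections import deque
--
-- def get_ordered_route_segments(source_route_segments):
--     segments_deque = deque(source_route_segments)
--
--     list_of_continuous_segments = []
--
--     while segments_deque:
--         continuous_segments = []
--
--         start_segment = segments_deque.popleft()
--
--         continuous_segments.append(start_segment)
--
--         for current_segment in continuous_segments:
--             next_segments = list(
--                 filter(
--                     lambda segment: current_segment[0] == segment[-1],
--                     segments_deque,
--                 ),
--             )
--             if next_segments:
--                 next_segment = next_segments[0]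
--                 continuous_segments.append(next_segment)
--                 segments_deque.remove(next_segment)
--
--         list_of_continuous_segments.append(continuous_segments)
--
--     return [segment for segments in list_of_continuous_segments for segment in segments]
-- ===== SOURCE B (Python) =====
-- from collections import deque
--
-- def get_ordered_route_segments(source_route_segments):
--     by_last = {}
--     for i, seg in enumerate(source_route_segments):
--         by_last.setdefault(seg[-1], deque()).append(i)
--     n = len(source_route_segments)
--     used = [False] * n
--     result = []
--     head = 0
--     while head < n:
--         if used[head]:
--             head += 1
--             continue
--         i = head
--         while i is not None:
--             used[i] = True
--             seg = source_route_segments[i]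
--             result.append(seg)
--             q = by_last.get(seg[0])
--             i = None
--             while q:
--                 k = q.popleft()
--                 if not used[k]:
--                     i = k
--                     break
--     return result
-- ===== Notes on version B (the rewrite author's own statement) =====
-- stated objective: faster
-- what changed: A repeatedly scans and removes from the whole deque for every chain step (filter + remove); B builds, in one pass, a dict from last-element to the queue of positions carrying it, keeps a used-flags array and a head cursor, so each chain step is an O(1) amortized lookup instead of a full scan.
-- outside the precondition, e.g. on get_ordered_route_segments([[]]): A returns [[]], B raises IndexError
import Mathlib
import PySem

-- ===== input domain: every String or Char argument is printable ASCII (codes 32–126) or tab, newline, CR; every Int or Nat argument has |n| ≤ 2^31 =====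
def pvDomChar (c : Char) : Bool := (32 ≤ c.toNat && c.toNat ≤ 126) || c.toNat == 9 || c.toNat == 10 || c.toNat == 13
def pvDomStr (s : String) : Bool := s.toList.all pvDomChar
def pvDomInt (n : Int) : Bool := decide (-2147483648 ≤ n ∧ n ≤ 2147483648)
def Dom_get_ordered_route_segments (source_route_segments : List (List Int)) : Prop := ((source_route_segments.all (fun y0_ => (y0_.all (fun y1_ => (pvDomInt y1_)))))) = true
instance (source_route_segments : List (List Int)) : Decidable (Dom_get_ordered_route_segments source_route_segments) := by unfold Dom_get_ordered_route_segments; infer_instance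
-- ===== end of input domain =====

-- B replaces A's quadratic scan-and-remove over the deque by a one-pass index from
-- last-element to the queue of positions carrying it, consulted in O(1) per chain step
-- (objective: faster, asymptotically).

-- ===== PORT A =====
-- lambda segment: current_segment[0] == segment[-1]
def pvPredA (cur seg : List Int) : Bool :=
  PySem.List.pyGet? cur 0 == PySem.List.pyGet? seg (-1)

-- the `for current_segment in continuous_segments` loop: the list grows by exactly the
-- appended match, so it is the recursion "extend the chain from the current segment";
-- fuel bounds the recursion (each step removes one element of the deque, so dq.length is enough).
def pvChainA : Nat → List Int → List (List Int) → List (List Int) × List (List Int)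
  | 0, cur, dq => ([cur], dq)
  | fuel+1, cur, dq =>
    match (dq.filter (pvPredA cur)).head? with
    | none => ([cur], dq)
    | some nxt =>
      let dq' := (PySem.List.remove? dq nxt).getD dq
      let r := pvChainA fuel nxt dq'
      (cur :: r.1, r.2)

-- the outer `while segments_deque:` loop; each iteration pops at least one element
def pvOuterA : Nat → List (List Int) → List (List (List Int))
  | 0, _ => []
  | fuel+1, dq =>
    match dq with
    | [] => []
    | s :: rest =>
      let r := pvChainA rest.length s rest
      r.1 :: pvOuterA fuel r.2

def get_ordered_route_segments (source_route_segments : List (List Int)) : List (List Int) :=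
  (pvOuterA source_route_segments.length source_route_segments).flatten

-- ===== PORT B =====
-- seg[-1] as the dict key (Source B raises on empty segments; outside Pre_ the default is irrelevant)
def pvKey (seg : List Int) : Int := (PySem.List.pyGet? seg (-1)).getD 0

-- `for i, seg in enumerate(...): by_last.setdefault(seg[-1], deque()).append(i)`
def pvIndexB (src : List (List Int)) : PySem.Dict Int (List Nat) :=
  src.zipIdx.foldl (fun d p => d.modify (pvKey p.1) [] (fun q => q ++ [p.2])) PySem.Dict.empty

-- `while q: k = q.popleft(); if not used[k]: i = k; break`
def pvSkipB (used : List Bool) : List Nat → Option Nat × List Nat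
  | [] => (none, [])
  | k :: q => if used.getD k false then pvSkipB used q else (some k, q)

-- the inner `while i is not None:` loop; fuel bounds it (each step marks one index used)
def pvChainB (src : List (List Int)) : Nat → PySem.Dict Int (List Nat) → List Bool → Nat →
    List (List Int) × PySem.Dict Int (List Nat) × List Bool
  | 0, d, used, _ => ([], d, used)
  | fuel+1, d, used, i =>
    let used1 := used.set i true
    let seg := src.getD i []
    let key := (PySem.List.pyGet? seg 0).getD 0
    match pvSkipB used1 (d.getD key []) with
    | (none, q') => ([seg], d.insert key q', used1)
    | (some k, q') =>
      let r := pvChainB src fuel (d.insert key q') used1 k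
      (seg :: r.1, r.2.1, r.2.2)

-- the outer `while head < n:` loop
def pvOuterB (src : List (List Int)) : Nat → PySem.Dict Int (List Nat) → List Bool → Nat → List (List Int)
  | 0, _, _, _ => []
  | fuel+1, d, used, head =>
    if head < src.length then
      if used.getD head false then pvOuterB src fuel d used (head+1)
      else
        let r := pvChainB src src.length d used head
        r.1 ++ pvOuterB src fuel r.2.1 r.2.2 head
    else []

def get_ordered_route_segments_alt (source_route_segments : List (List Int)) : List (List Int) :=
  pvOuterB source_route_segments (2 * source_route_segments.length + 1)
    (pvIndexB source_route_segments)
    (List.replicate source_route_segments.length false) 0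

-- ===== PRECONDITION & SPEC =====
-- Pre_ excludes inputs containing an empty segment: Python A raises IndexError on seg[0]/seg[-1]
-- there (except on the lone input [[]], where A's filter never runs and it returns [[]]),
-- and B itself raises IndexError building its seg[-1] index.
def Pre_get_ordered_route_segments (source_route_segments : List (List Int)) : Prop :=
  ∀ s ∈ source_route_segments, s ≠ []
instance (source_route_segments : List (List Int)) : Decidable (Pre_get_ordered_route_segments source_route_segments) := by unfold Pre_get_ordered_route_segments; infer_instance
def pvWitness_get_ordered_route_segments : List (List Int) := [[1, 2], [3, 1], [5, 6]]

def Spec_get_ordered_route_segments (source_route_segments : List (List Int)) (out : List (List Int)) : Prop := out = get_ordered_route_segments_alt source_route_segments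
instance (source_route_segments : List (List Int)) (out : List (List Int)) : Decidable (Spec_get_ordered_route_segments source_route_segments out) := by unfold Spec_get_ordered_route_segments; infer_instance

-- ===== CLAIM (what is proved, stated in full; the proofs are below) =====
def Claim_equal_get_ordered_route_segments : Prop := ∀ (source_route_segments : List (List Int)), Dom_get_ordered_route_segments source_route_segments → Pre_get_ordered_route_segments source_route_segments → Spec_get_ordered_route_segments source_route_segments (get_ordered_route_segments source_route_segments)

-- ===== LEMMAS AND PROOFS =====

-- indices still unused, in original deque order
def pvUnused (used : List Bool) : List Nat :=
  (List.range used.length).filter (fun i => !used.getD i false)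

-- the segments sitting at those indices
def pvSegs (src : List (List Int)) (l : List Nat) : List (List Int) :=
  l.map (fun i => src.getD i [])

-- dictionary invariant: under each key, the unused entries of its queue are exactly the
-- unused indices whose segment ends with that key, in increasing order
def pvInv (src : List (List Int)) (d : PySem.Dict Int (List Nat)) (used : List Bool) : Prop :=
  ∀ v : Int, (d.getD v []).filter (fun k => !used.getD k false)
    = (List.range used.length).filter (fun i => !used.getD i false && (pvKey (src.getD i []) == v))

theorem pvSkip_spec (used : List Bool) :
    ∀ q : List Nat, (pvSkipB used q).1 = (q.filter (fun k => !used.getD k false)).head? ∧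
      (pvSkipB used q).2.filter (fun k => !used.getD k false)
        = (q.filter (fun k => !used.getD k false)).tail := by
  intro q; induction q with
  | nil => simp [pvSkipB]
  | cons k q ih =>
    by_cases h : used[k]?.getD false = true <;>
      simp [pvSkipB, List.getD, h, ih] <;>
      simp [List.getD] at ih <;> simp [ih]

theorem pvGetD_set (used : List Bool) (k j : Nat) (hk : k < used.length) :
    (used.set k true).getD j false = if j = k then true else used.getD j false := by
  rcases eq_or_ne j k with rfl|h
  · simp [List.getD, hk]
  · simp [List.getD, List.getElem?_set_ne (by omega : k ≠ j), h]

-- turning one index used filters that index out of any filtered list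
theorem pvFilter_upd {α : Type} [BEq α] [LawfulBEq α] (p p' : α → Bool) (k : α)
    (hag : ∀ j, j ≠ k → p' j = p j) (hk : p' k = false) :
    ∀ l : List α, l.filter p' = (l.filter p).filter (fun j => !(j == k)) := by
  intro l; induction l with
  | nil => simp
  | cons a t ih =>
    rcases eq_or_ne a k with rfl|h
    · by_cases hp : p a <;> simp [hp, hk, ih]
    · by_cases hp : p a <;> simp [hp, hag a h, h, ih]

theorem pvEraseP_eq_filter_ne (p : Nat → Bool) (k : Nat) :
    ∀ (l t : List Nat), l.Nodup → l.filter p = k :: t → l.eraseP p = l.filter (fun j => !(j == k)) := by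
  intro l; induction l with
  | nil => simp
  | cons a r ih =>
    intro t hnd hf
    by_cases hp : p a
    · simp [hp] at hf
      obtain ⟨rfl, rfl⟩ := hf
      rw [List.eraseP_cons_of_pos hp, List.filter_cons]
      simp
      exact (List.filter_eq_self.2 (fun x hx => by
        simp; rintro rfl; exact (List.nodup_cons.1 hnd).1 hx)).symm
    · rw [List.filter_cons_of_neg (by simpa using hp)] at hf
      have hk : k ∈ r := by
        have : k ∈ r.filter p := by rw [hf]; simp
        exact List.mem_of_mem_filter this
      have hak : a ≠ k := fun h => (List.nodup_cons.1 hnd).1 (h ▸ hk)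
      rw [List.eraseP_cons_of_neg (by simpa using hp), List.filter_cons_of_pos (by simpa using hak),
        ih t (List.nodup_cons.1 hnd).2 hf]

theorem pvRemove_eq_eraseP (p : List Int → Bool) (x : List Int) :
    ∀ dq : List (List Int), (dq.filter p).head? = some x →
      (PySem.List.remove? dq x).getD dq = dq.eraseP p := by
  intro dq; induction dq with
  | nil => simp
  | cons a r ih =>
    intro hf
    by_cases hp : p a
    · rw [List.filter_cons_of_pos hp] at hf
      simp at hf; subst hf
      simp [List.eraseP_cons_of_pos hp]
    · rw [List.filter_cons_of_neg (by simpa using hp)] at hf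
      have hpx : p x := by
        have : x ∈ r.filter p := List.mem_of_mem_head? hf
        exact List.of_mem_filter this
      have hax : a ≠ x := fun h => hp (h ▸ hpx)
      rw [PySem.List.remove?_cons_of_ne r hax, List.eraseP_cons_of_neg (by simpa using hp)]
      cases hr : PySem.List.remove? r x with
      | none =>
        exfalso
        have : x ∈ r := List.mem_of_mem_filter (List.mem_of_mem_head? hf)
        rw [PySem.List.remove?_eq_none_iff] at hr; exact hr this
      | some l => simp [hr, ← ih hf]

theorem pvErasePcongr {α : Type} (p q : α → Bool) :
    ∀ l : List α, (∀ a ∈ l, p a = q a) → l.eraseP p = l.eraseP q := by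
  intro l; induction l with
  | nil => simp
  | cons a t ih =>
    intro h
    by_cases hp : p a <;> simp [hp, ← h a (by simp), ih (fun x hx => h x (by simp [hx]))]

-- the index built by B's first pass
theorem pvIndex_fold (v : Int) :
    ∀ (l : List (List Int × Nat)) (d : PySem.Dict Int (List Nat)),
      ((l.foldl (fun d p => d.modify (pvKey p.1) [] (fun q => q ++ [p.2])) d).getD v [])
        = d.getD v [] ++ (l.filter (fun p => pvKey p.1 == v)).map (·.2) := by
  intro l; induction l with
  | nil => simp
  | cons a t ih =>
    intro d
    rw [List.foldl_cons, ih]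
    by_cases h : pvKey a.1 = v
    · rw [← h, PySem.Dict.getD_modify_self]
      simp [h]
    · rw [PySem.Dict.getD_modify_of_ne _ _ _ (fun hh => h hh.symm)]
      simp [h]

theorem pvZipIdx_filter (v : Int) :
    ∀ (l : List (List Int)) (s : Nat),
      ((l.zipIdx s).filter (fun p => pvKey p.1 == v)).map (·.2)
        = (List.range' s l.length).filter (fun i => pvKey (l.getD (i - s) []) == v) := by
  intro l; induction l with
  | nil => simp
  | cons a t ih =>
    intro s
    rw [List.zipIdx_cons, List.filter_cons, (show (a :: t).length = t.length + 1 from rfl),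
      List.range'_succ, List.filter_cons]
    have h2 : (List.range' (s+1) t.length).filter (fun i => pvKey ((a :: t).getD (i - s) []) == v)
        = (List.range' (s+1) t.length).filter (fun i => pvKey (t.getD (i - (s+1)) []) == v) := by
      apply List.filter_congr
      intro i hi
      have : s + 1 ≤ i := (List.mem_range'_1.1 hi).1
      have hgd : (a :: t).getD (i - s) [] = t.getD (i - (s+1)) [] := by
        have : i - s = (i - (s+1)) + 1 := by omega
        rw [this]; simp [List.getD]
      rw [hgd]
    simp only [List.getD] at h2
    by_cases h : pvKey a = v <;> simp [List.getD, h, h2, ih]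

theorem pvIndex_spec (src : List (List Int)) (v : Int) :
    (pvIndexB src).getD v [] = (List.range src.length).filter (fun i => pvKey (src.getD i []) == v) := by
  rw [pvIndexB, pvIndex_fold, pvZipIdx_filter]
  simp [List.range_eq_range']


theorem pvBeqComm (a b : Int) : (a == b) = (b == a) := by
  by_cases h : a = b
  · simp [h]
  · simp [h, Ne.symm h]

theorem pvGetD_replicate (n k : Nat) : (List.replicate n false).getD k false = false := by
  simp only [List.getD, List.getElem?_replicate]
  by_cases h : k < n <;> simp [h]

theorem pvSrcNe (src : List (List Int)) (hPre : ∀ s ∈ src, s ≠ []) (i : Nat)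
    (hi : i < src.length) : src.getD i [] ≠ [] := by
  have : src.getD i [] = src[i] := List.getD_eq_getElem src [] hi
  rw [this]; exact hPre _ (List.getElem_mem hi)

theorem pvPred_eq (cur seg : List Int) (hcur : cur ≠ []) (hseg : seg ≠ []) :
    pvPredA cur seg = (pvKey seg == (PySem.List.pyGet? cur 0).getD 0) := by
  obtain ⟨c, cs, rfl⟩ := List.exists_cons_of_ne_nil hcur
  have h1 : PySem.List.pyGet? (c :: cs) 0 = some c := by simp [pysem]
  have h2 : PySem.List.pyGet? seg (-1) = some (seg.getLast hseg) := by
    simp [pysem, List.getLast?_eq_some_getLast, hseg]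
  rw [pvPredA, pvKey, h1, h2]
  simp [pvBeqComm]

theorem pvGetElem_set (used : List Bool) (k j : Nat) (hk : k < used.length) :
    (used.set k true)[j]?.getD false = if j = k then true else used[j]?.getD false := by
  have h := pvGetD_set used k j hk
  simpa [List.getD] using h

theorem pvMemUnused (used : List Bool) (j : Nat) :
    j ∈ pvUnused used ↔ j < used.length ∧ used.getD j false = false := by
  simp [pvUnused, List.mem_filter, List.mem_range]

theorem pvNodupUnused (used : List Bool) : (pvUnused used).Nodup :=
  List.Nodup.filter _ List.nodup_range

theorem pvUnusedSet (used : List Bool) (k : Nat) (hk : k < used.length) :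
    pvUnused (used.set k true) = (pvUnused used).filter (fun j => !(j == k)) := by
  rw [pvUnused, pvUnused, List.length_set]
  exact pvFilter_upd (fun j => !used.getD j false) (fun j => !(used.set k true).getD j false) k
    (fun j hj => by simp only []; rw [pvGetD_set used k j hk]; simp [hj])
    (by simp only []; rw [pvGetD_set used k k hk]; simp) _

theorem pvFilterLen (k : Nat) :
    ∀ l : List Nat, l.Nodup → k ∈ l → (l.filter (fun j => !(j == k))).length + 1 = l.length := by
  intro l; induction l with
  | nil => simp
  | cons a t ih =>
    intro hnd hm
    by_cases h : a = k
    · rw [← h]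
      have hnt : a ∉ t := (List.nodup_cons.1 hnd).1
      rw [List.filter_cons_of_neg (by simp)]
      rw [List.filter_eq_self.2 (fun x hx => by simp; rintro rfl; exact hnt hx)]
      simp
    · have hm' : k ∈ t := by rcases List.mem_cons.1 hm with rfl|h2; exact absurd rfl h; exact h2
      rw [List.filter_cons_of_pos (by simp [h])]
      simp only [List.length_cons]
      rw [ih (List.nodup_cons.1 hnd).2 hm']

-- main chain lemma: B's inner loop computes A's chain and the residual states correspond
theorem pvChain_eq (src : List (List Int)) (hPre : ∀ s ∈ src, s ≠ []) :
    ∀ fB fA (d : PySem.Dict Int (List Nat)) (used : List Bool) (i : Nat),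
      used.length = src.length → i < used.length → used.getD i false = false →
      pvInv src d (used.set i true) →
      (pvUnused (used.set i true)).length ≤ fA →
      (pvUnused (used.set i true)).length < fB →
      (pvChainB src fB d used i).1 = (pvChainA fA (src.getD i []) (pvSegs src (pvUnused (used.set i true)))).1 ∧
      (pvChainA fA (src.getD i []) (pvSegs src (pvUnused (used.set i true)))).2
        = pvSegs src (pvUnused (pvChainB src fB d used i).2.2) ∧
      pvInv src (pvChainB src fB d used i).2.1 (pvChainB src fB d used i).2.2 ∧
      (pvChainB src fB d used i).2.2.length = src.length ∧
      (∀ j, (used.set i true).getD j false = true → (pvChainB src fB d used i).2.2.getD j false = true) ∧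
      (pvUnused (pvChainB src fB d used i).2.2).length ≤ (pvUnused (used.set i true)).length := by
  intro fB
  induction fB with
  | zero => intro fA d used i _ _ _ _ _ hfB; omega
  | succ fB ih =>
    intro fA d used i hlen hi hiu hInv hfA hfB
    have hilt : i < src.length := by omega
    have hcur_ne : src.getD i [] ≠ [] := pvSrcNe src hPre i hilt
    have hlen1 : (used.set i true).length = src.length := by simpa using hlen
    have hfil : (pvSegs src (pvUnused (used.set i true))).filter (pvPredA (src.getD i []))
        = pvSegs src ((pvUnused (used.set i true)).filter
            (fun j => pvKey (src.getD j []) == (PySem.List.pyGet? (src.getD i []) 0).getD 0)) := by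
      rw [pvSegs, pvSegs, List.filter_map]
      congr 1
      apply List.filter_congr
      intro j hj
      have hjlt : j < src.length := by
        have h2 := (pvMemUnused _ j).1 hj
        omega
      simp only [Function.comp]
      exact pvPred_eq _ _ hcur_ne (pvSrcNe src hPre j hjlt)
    have hUq : (pvUnused (used.set i true)).filter
          (fun j => pvKey (src.getD j []) == (PySem.List.pyGet? (src.getD i []) 0).getD 0)
        = (d.getD ((PySem.List.pyGet? (src.getD i []) 0).getD 0) []).filter
            (fun j => !(used.set i true).getD j false) := by
      rw [hInv _, pvUnused, List.filter_filter]
      exact List.filter_congr (fun a _ => by rw [Bool.and_comm])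
    have hskip := pvSkip_spec (used.set i true)
      (d.getD ((PySem.List.pyGet? (src.getD i []) 0).getD 0) [])
    rcases hrr : pvSkipB (used.set i true)
        (d.getD ((PySem.List.pyGet? (src.getD i []) 0).getD 0) []) with ⟨o, q'⟩
    rw [hrr] at hskip
    obtain ⟨ho, hq'⟩ := hskip
    simp only at ho hq'
    rcases hc : (pvUnused (used.set i true)).filter
        (fun j => pvKey (src.getD j []) == (PySem.List.pyGet? (src.getD i []) 0).getD 0) with _ | ⟨k, t⟩
    · -- no continuation: the chain ends here
      have hq0 : (d.getD ((PySem.List.pyGet? (src.getD i []) 0).getD 0) []).filter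
          (fun j => !(used.set i true).getD j false) = [] := by rw [← hUq, hc]
      rw [hq0] at ho hq'
      simp at ho
      subst ho
      have hA : pvChainA fA (src.getD i []) (pvSegs src (pvUnused (used.set i true)))
          = ([src.getD i []], pvSegs src (pvUnused (used.set i true))) := by
        cases fA with
        | zero => rfl
        | succ m =>
          simp only [pvChainA]
          rw [hfil, hc]
          simp [pvSegs]
      have hB : pvChainB src (fB+1) d used i
          = ([src.getD i []], d.insert ((PySem.List.pyGet? (src.getD i []) 0).getD 0) q',
             used.set i true) := by
        simp only [pvChainB, hrr]
      rw [hA, hB]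
      refine ⟨rfl, rfl, ?_, by simpa using hlen, fun j hj => hj, le_refl _⟩
      intro v
      by_cases hv : v = (PySem.List.pyGet? (src.getD i []) 0).getD 0
      · subst hv
        rw [PySem.Dict.getD_insert_self, hq', ← hInv _]
        rw [hq0]
        rfl
      · rw [PySem.Dict.getD_insert_of_ne _ _ _ hv]
        exact hInv v
    · -- continuation found at index k
      have hkU : k ∈ pvUnused (used.set i true) := by
        have : k ∈ (pvUnused (used.set i true)).filter
            (fun j => pvKey (src.getD j []) == (PySem.List.pyGet? (src.getD i []) 0).getD 0) := by
          rw [hc]; simp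
        exact List.mem_of_mem_filter this
      have hkmem := (pvMemUnused _ k).1 hkU
      have hklt : k < (used.set i true).length := hkmem.1
      have hkun : (used.set i true).getD k false = false := hkmem.2
      have hUnd : (pvUnused (used.set i true)).Nodup := pvNodupUnused _
      have hknt : k ∉ t := by
        have := hc ▸ List.Nodup.filter _ hUnd
        exact (List.nodup_cons.1 this).1
      have hq : (d.getD ((PySem.List.pyGet? (src.getD i []) 0).getD 0) []).filter
          (fun j => !(used.set i true).getD j false) = k :: t := by rw [← hUq, hc]
      rw [hq] at ho hq'
      simp at ho
      subst ho
      simp only [List.tail_cons] at hq'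
      have hUlen : ((pvUnused (used.set i true)).filter (fun j => !(j == k))).length + 1
          = (pvUnused (used.set i true)).length := pvFilterLen k _ hUnd hkU
      have hU1 : 1 ≤ (pvUnused (used.set i true)).length := by
        have : pvUnused (used.set i true) ≠ [] := fun h => by simp [h] at hkU
        exact List.length_pos_of_ne_nil this
      cases fA with
      | zero => omega
      | succ fA' =>
        have hheadA : ((pvSegs src (pvUnused (used.set i true))).filter
            (pvPredA (src.getD i []))).head? = some (src.getD k []) := by
          rw [hfil, hc]; simp [pvSegs]
        have herase : (pvSegs src (pvUnused (used.set i true))).eraseP (pvPredA (src.getD i []))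
            = pvSegs src (pvUnused ((used.set i true).set k true)) := by
          rw [pvSegs, List.eraseP_map,
            pvErasePcongr _ (fun j => pvKey (src.getD j []) == (PySem.List.pyGet? (src.getD i []) 0).getD 0) _
              (fun j hj => by
                have hjlt : j < src.length := by
                  have h2 := (pvMemUnused _ j).1 hj
                  omega
                simp only [Function.comp]
                exact pvPred_eq _ _ hcur_ne (pvSrcNe src hPre j hjlt)),
            pvEraseP_eq_filter_ne _ k _ t hUnd hc, pvUnusedSet _ k hklt, pvSegs]
        have hrw : (PySem.List.remove? (pvSegs src (pvUnused (used.set i true))) (src.getD k [])).getD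
              (pvSegs src (pvUnused (used.set i true)))
            = pvSegs src (pvUnused ((used.set i true).set k true)) := by
          rw [pvRemove_eq_eraseP _ _ _ hheadA, herase]
        have hA : pvChainA (fA'+1) (src.getD i []) (pvSegs src (pvUnused (used.set i true)))
            = ((src.getD i []) :: (pvChainA fA' (src.getD k [])
                  (pvSegs src (pvUnused ((used.set i true).set k true)))).1,
               (pvChainA fA' (src.getD k [])
                  (pvSegs src (pvUnused ((used.set i true).set k true)))).2) := by
          simp only [pvChainA, hheadA, hrw]
        have hB : pvChainB src (fB+1) d used i
            = ((src.getD i []) :: (pvChainB src fB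
                  (d.insert ((PySem.List.pyGet? (src.getD i []) 0).getD 0) q') (used.set i true) k).1,
               (pvChainB src fB
                  (d.insert ((PySem.List.pyGet? (src.getD i []) 0).getD 0) q') (used.set i true) k).2.1,
               (pvChainB src fB
                  (d.insert ((PySem.List.pyGet? (src.getD i []) 0).getD 0) q') (used.set i true) k).2.2) := by
          simp only [pvChainB, hrr]
        have hlen2 : (used.set i true).length = src.length := hlen1
        have hInv2 : pvInv src (d.insert ((PySem.List.pyGet? (src.getD i []) 0).getD 0) q')
            ((used.set i true).set k true) := by
          intro v
          have hflt : ∀ l : List Nat, l.filter (fun j => !((used.set i true).set k true).getD j false)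
              = (l.filter (fun j => !(used.set i true).getD j false)).filter (fun j => !(j == k)) :=
            pvFilter_upd _ _ k
              (fun j hj => by simp [List.getD, pvGetElem_set _ k j hklt, hj])
              (by simp [List.getD, pvGetElem_set _ k k hklt])
          have hflt2 : ∀ l : List Nat, l.filter
                (fun j => !((used.set i true).set k true).getD j false && (pvKey (src.getD j []) == v))
              = (l.filter (fun j => !(used.set i true).getD j false && (pvKey (src.getD j []) == v))).filter
                  (fun j => !(j == k)) :=
            pvFilter_upd _ _ k
              (fun j hj => by simp [List.getD, pvGetElem_set _ k j hklt, hj])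
              (by simp [List.getD, pvGetElem_set _ k k hklt])
          have hlenset : ((used.set i true).set k true).length = (used.set i true).length := by simp
          by_cases hv : v = (PySem.List.pyGet? (src.getD i []) 0).getD 0
          · subst hv
            rw [PySem.Dict.getD_insert_self, hflt q', hq', hlenset, hflt2 _, ← hInv _, hq]
            rw [List.filter_cons_of_neg (by simp)]
          · rw [PySem.Dict.getD_insert_of_ne _ _ _ hv, hflt _, hInv v, hlenset, hflt2 _]
        have hrec := ih fA' (d.insert ((PySem.List.pyGet? (src.getD i []) 0).getD 0) q')
          (used.set i true) k hlen2 hklt hkun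
          hInv2
          (by rw [pvUnusedSet _ k hklt]; omega)
          (by rw [pvUnusedSet _ k hklt]; omega)
        obtain ⟨e1, e2, e3, e4, e5, e6⟩ := hrec
        rw [hA, hB]
        refine ⟨by rw [e1], e2, e3, e4, ?_, ?_⟩
        · intro j hj
          apply e5
          rw [pvGetD_set _ k j hklt]
          by_cases hjk : j = k
          · simp [hjk]
          · rw [if_neg hjk]; exact hj
        · calc (pvUnused (pvChainB src fB
                  (d.insert ((PySem.List.pyGet? (src.getD i []) 0).getD 0) q') (used.set i true) k).2.2).length
              ≤ (pvUnused ((used.set i true).set k true)).length := e6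
            _ ≤ (pvUnused (used.set i true)).length := by rw [pvUnusedSet _ k hklt]; omega

theorem pvOuterA_nil (fA : Nat) : pvOuterA fA [] = [] := by cases fA <;> rfl

theorem pvRangeFilterMin (p : Nat → Bool) (head : Nat) :
    ∀ n, head < n → p head = true → (∀ j, j < head → p j = false) →
      (List.range n).filter p = head :: (List.range n).filter (fun j => p j && !(j == head)) := by
  intro n; induction n with
  | zero => omega
  | succ m ihm =>
    intro h hp hb
    rw [List.range_succ, List.filter_append, List.filter_append]
    rcases Nat.lt_or_ge head m with hlt|hge
    · rw [ihm hlt hp hb]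
      have hmh : (m == head) = false := by simp; omega
      cases hpm : p m <;> simp [hpm, hmh]
    · have hhm : head = m := by omega
      subst hhm
      have hz1 : (List.range head).filter p = [] :=
        List.filter_eq_nil_iff.2 (fun j hj => by simp [hb j (List.mem_range.1 hj)])
      have hz2 : (List.range head).filter (fun j => p j && !(j == head)) = [] :=
        List.filter_eq_nil_iff.2 (fun j hj => by simp [hb j (List.mem_range.1 hj)])
      rw [hz1, hz2]
      simp [hp]

theorem pvOuter_eq (src : List (List Int)) (hPre : ∀ s ∈ src, s ≠ []) :
    ∀ fB fA (d : PySem.Dict Int (List Nat)) (used : List Bool) (head : Nat),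
      used.length = src.length → pvInv src d used →
      (∀ j, j < head → used.getD j false = true) →
      (pvUnused used).length ≤ fA →
      (src.length - head) + (pvUnused used).length < fB →
      pvOuterB src fB d used head = (pvOuterA fA (pvSegs src (pvUnused used))).flatten := by
  intro fB
  induction fB with
  | zero => intro fA d used head _ _ _ _ hfB; omega
  | succ fB ih =>
    intro fA d used head hlen hInv hpre hfA hfB
    by_cases hh : head < src.length
    · by_cases hu : used.getD head false = true
      · rw [show pvOuterB src (fB+1) d used head = pvOuterB src fB d used (head+1) by
          simp only [pvOuterB, if_pos hh, hu, if_true]]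
        exact ih fA d used (head+1) hlen hInv
          (fun j hj => by
            rcases Nat.lt_or_ge j head with h2|h2
            · exact hpre j h2
            · have : j = head := by omega
              rw [this]; exact hu)
          hfA (by omega)
      · have hu' : used.getD head false = false := by simpa using hu
        have hhlt : head < used.length := by omega
        have hu2 : used[head]?.getD false = false := by simpa [List.getD] using hu'
        have hpre2 : ∀ j, j < head → used[j]?.getD false = true :=
          fun j hj => by simpa [List.getD] using hpre j hj
        have hfirst : pvUnused used = head :: pvUnused (used.set head true) := by
          rw [pvUnused, pvRangeFilterMin (fun i => !used.getD i false) head used.length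
            hhlt (by simp [List.getD, hu2]) (fun j hj => by simp [List.getD, hpre2 j hj])]
          congr 1
          rw [pvUnused, List.length_set]
          apply List.filter_congr
          intro j _
          rw [pvGetD_set _ head j hhlt]
          by_cases hjh : j = head <;> simp [hjh]
        have hInv1 : pvInv src d (used.set head true) := by
          intro v
          have h1 := pvFilter_upd (fun j => !used.getD j false)
            (fun j => !(used.set head true).getD j false) head
            (fun j hj => by simp [List.getD, pvGetElem_set _ head j hhlt, hj])
            (by simp [List.getD, pvGetElem_set _ head head hhlt])
          have h2 := pvFilter_upd
            (fun j => !used.getD j false && (pvKey (src.getD j []) == v))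
            (fun j => !(used.set head true).getD j false && (pvKey (src.getD j []) == v)) head
            (fun j hj => by simp [List.getD, pvGetElem_set _ head j hhlt, hj])
            (by simp [List.getD, pvGetElem_set _ head head hhlt])
          rw [h1 _, hInv v, List.length_set, h2 _]
        have hcount : (pvUnused used).length = (pvUnused (used.set head true)).length + 1 := by
          rw [hfirst]; rfl
        have hc1 : (pvUnused (used.set head true)).length + 1 ≤ used.length := by
          rw [← hcount]
          exact le_trans (List.length_filter_le _ _) (by simp)
        cases fA with
        | zero => omega
        | succ fA' =>
          have hchain := pvChain_eq src hPre src.length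
            (pvSegs src (pvUnused (used.set head true))).length d used head
            hlen hhlt hu' hInv1
            (by simp [pvSegs])
            (by omega)
          obtain ⟨e1, e2, e3, e4, e5, e6⟩ := hchain
          rw [show pvOuterB src (fB+1) d used head
              = (pvChainB src src.length d used head).1
                ++ pvOuterB src fB (pvChainB src src.length d used head).2.1
                    (pvChainB src src.length d used head).2.2 head by
            simp only [pvOuterB, if_pos hh, hu', Bool.false_eq_true, if_false]]
          rw [show pvOuterA (fA'+1) (pvSegs src (pvUnused used))
              = (pvChainA (pvSegs src (pvUnused (used.set head true))).length (src.getD head [])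
                  (pvSegs src (pvUnused (used.set head true)))).1
                :: pvOuterA fA' (pvChainA (pvSegs src (pvUnused (used.set head true))).length
                  (src.getD head []) (pvSegs src (pvUnused (used.set head true)))).2 by
            rw [hfirst]
            simp only [pvSegs, List.map_cons, pvOuterA, List.length_map]]
          rw [List.flatten_cons, ← e1, e2]
          congr 1
          exact ih fA' _ _ head e4 e3
            (fun j hj => e5 j (by
              rw [pvGetD_set _ head j hhlt]
              rw [if_neg (by omega)]
              exact hpre j hj))
            (by omega) (by omega)
    · have hU : pvUnused used = [] := by
        rw [pvUnused]
        apply List.filter_eq_nil_iff.2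
        intro j hj
        have hjl : j < used.length := List.mem_range.1 hj
        have h3 : used[j]?.getD false = true := by
          simpa [List.getD] using hpre j (by omega)
        simp [List.getD, h3]
      rw [show pvOuterB src (fB+1) d used head = [] by
        simp only [pvOuterB, if_neg hh]]
      rw [hU]
      rw [show pvSegs src [] = [] from rfl, pvOuterA_nil]
      rfl

-- ===== VERDICT (by name: the statement is the Claim_ definition above) =====
theorem get_ordered_route_segments_spec : Claim_equal_get_ordered_route_segments := by
  intro src _ hPre
  unfold Spec_get_ordered_route_segments get_ordered_route_segments get_ordered_route_segments_alt
  have h0 : (List.replicate src.length false).length = src.length := by simp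
  have hU0 : pvUnused (List.replicate src.length false) = List.range src.length := by
    rw [pvUnused, h0]
    exact List.filter_eq_self.2 (fun j _ => by rw [pvGetD_replicate]; rfl)
  have hSegs0 : pvSegs src (List.range src.length) = src := by
    apply List.ext_getElem
    · simp [pvSegs]
    · intro i h1 h2
      simp only [pvSegs, List.getElem_map, List.getElem_range]
      exact List.getD_eq_getElem src [] (by simpa using h2)
  have hInv0 : pvInv src (pvIndexB src) (List.replicate src.length false) := by
    intro v
    rw [h0, List.filter_eq_self.2 (fun k _ => by rw [pvGetD_replicate]; rfl), pvIndex_spec]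
    exact List.filter_congr (fun i _ => by rw [pvGetD_replicate]; simp)
  have h := pvOuter_eq src hPre (2*src.length+1) src.length (pvIndexB src)
    (List.replicate src.length false) 0 h0 hInv0 (fun j hj => by omega)
    (by rw [hU0]; simp)
    (by rw [hU0]; simp; omega)
  rw [hU0, hSegs0] at h
  exact h.symm
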